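-- pv_equiv track=rewrite | github.com/shaimaasultan/Number_Theory | number_theory.py | generate_shosho_list_final
-- ===== SOURCE A (Python) =====
-- from typing import List
-- import math
--
-- def get_first_divisor_or_prime(N):
--     """
--     Returns the first odd divisor 'i' if N is composite, or N itself if prime.
--     Assumes N is odd.
--     """
--     if N % 2 == 0:
--         # Should not happen as we iterate only odd numbers
--         return 2
--     for i in range(3, int(math.sqrt(N)) + 1 ,2):
--         if N % i == 0:
--             return i
--     return N # N is prime
--
-- def generate_shosho_list_final(limit: int) -> List[int]:
--     """
--     Sequentially generates the flattened list based on the derived rules: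
--     - Prime p: Count is (p - 1) / 2.
--     - Composite c: Count is (first_prime_divisor(c) - 1) / 2.
--     """
--     final_list: List[int] = [2]
--
--     # We iterate through odd numbers starting from 3 up to the limit
--     for num in range(3, limit + 1, 2):
--         # A will be either 'num' (if prime) or the first odd divisor (if composite)
--         A = get_first_divisor_or_prime(num)
--         repeat_count = 0
--         if num == A:
--             # 1. PRIME RULE: A is the number itself. Count = (num - 1) / 2
--             repeat_count = (num - 1) // 2
--         else:
--             # 2. COMPOSITE RULE: A is the first odd divisor. Count = (A - 1) / 2
--             # int((A/2) - 0.5) is mathematically equivalent to (A - 1) // 2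
--             repeat_count = (A - 1) // 2
--
--         final_list.extend([num] * repeat_count)
--
--     return final_list
-- ===== SOURCE B (Python) =====
-- from typing import List
-- import math
--
-- def generate_shosho_list_final(limit: int) -> List[int]:
--     final_list: List[int] = [2]
--     if limit < 3:
--         return final_list
--     # Sieve of smallest prime factors: spf[m] == m means "no prime <= current p divides m".
--     spf = list(range(limit + 1))
--     for p in range(3, math.isqrt(limit) + 1, 2):
--         if spf[p] == p:  # p is prime
--             for m in range(p * p, limit + 1, 2 * p):
--                 if spf[m] == m:
--                     spf[m] = p
--     for num in range(3, limit + 1, 2):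
--         final_list.extend([num] * ((spf[num] - 1) // 2))
--     return final_list
-- ===== Notes on version B (the rewrite author's own statement) =====
-- stated objective: alternative
-- what changed: Replaces A's per-number trial division (sqrt-bounded divisor scan for each odd number) by a single smallest-prime-factor sieve built once up to the limit, from which each repeat count is then read; total runtime is dominated by building the output list, so overall cost is similar.
import Mathlib
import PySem

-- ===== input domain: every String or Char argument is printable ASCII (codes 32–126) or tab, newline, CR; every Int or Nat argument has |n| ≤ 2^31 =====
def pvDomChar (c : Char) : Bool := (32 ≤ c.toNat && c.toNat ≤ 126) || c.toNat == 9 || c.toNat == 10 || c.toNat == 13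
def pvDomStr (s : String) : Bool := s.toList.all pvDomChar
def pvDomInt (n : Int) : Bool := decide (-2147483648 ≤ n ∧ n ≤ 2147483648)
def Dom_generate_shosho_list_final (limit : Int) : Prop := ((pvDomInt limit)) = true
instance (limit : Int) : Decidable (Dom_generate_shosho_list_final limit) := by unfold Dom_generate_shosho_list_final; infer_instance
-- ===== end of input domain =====

-- B replaces A's per-number trial division by a single smallest-prime-factor sieve; return value proved identical.


-- ===== PORT A =====
-- int(math.sqrt(N)) is ported as Int.sqrt; exact for every N this helper receives on the domain (|N| ≤ 2^31).
def get_first_divisor_or_prime (N : Int) : Int :=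
  if PySem.Int.mod N 2 = 0 then 2
  else
    match (PySem.List.pyRange 3 (Int.sqrt N + 1) 2).find? (fun i => PySem.Int.mod N i == 0) with
    | some i => i
    | none => N

def generate_shosho_list_final (limit : Int) : List Int :=
  (PySem.List.pyRange 3 (limit + 1) 2).foldl
    (fun acc num =>
      let A := get_first_divisor_or_prime num
      let repeat_count : Int :=
        if num = A then PySem.Int.floordiv (num - 1) 2
        else PySem.Int.floordiv (A - 1) 2
      acc ++ PySem.List.pyRepeat [num] repeat_count)
    [2]

-- ===== PORT B =====
-- Source B's spf list holds nonnegative values and is indexed only in bounds, so it is a List Nat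
-- accessed with getD/set (exact for those accesses); math.isqrt → Nat.sqrt (exact).
-- pvSieveInner / pvOuterStep are the bodies of Source B's inner and outer sieve loops.
def pvSieveInner (p : Nat) (spf : List Nat) (m : Int) : List Nat :=
  if spf.getD m.toNat 0 = m.toNat then spf.set m.toNat p else spf

def pvOuterStep (n : Nat) (spf : List Nat) (pi : Int) : List Nat :=
  if spf.getD pi.toNat 0 = pi.toNat then
    (PySem.List.pyRange ((pi.toNat * pi.toNat : Nat) : Int) ((n : Int) + 1)
      ((2 * pi.toNat : Nat) : Int)).foldl (pvSieveInner pi.toNat) spf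
  else spf

def pvSieveSpf (n : Nat) : List Nat :=
  (PySem.List.pyRange 3 ((Nat.sqrt n : Int) + 1) 2).foldl (pvOuterStep n) (List.range (n + 1))

def generate_shosho_list_final_alt (limit : Int) : List Int :=
  if limit < 3 then [2]
  else
    let spf := pvSieveSpf limit.toNat
    (PySem.List.pyRange 3 (limit + 1) 2).foldl
      (fun acc num => acc ++ List.replicate ((spf.getD num.toNat 0 - 1) / 2) num) [2]

-- ===== PRECONDITION & SPEC =====
def Spec_generate_shosho_list_final (limit : Int) (out : List Int) : Prop := out = generate_shosho_list_final_alt limit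
instance (limit : Int) (out : List Int) : Decidable (Spec_generate_shosho_list_final limit out) := by unfold Spec_generate_shosho_list_final; infer_instance

-- ===== CLAIM (what is proved, stated in full; the proofs are below) =====
def Claim_equal_generate_shosho_list_final : Prop := ∀ (limit : Int), Dom_generate_shosho_list_final limit → Spec_generate_shosho_list_final limit (generate_shosho_list_final limit)

-- ===== LEMMAS AND PROOFS =====

theorem pvRange_cons (a b s : Int) (hs : 0 < s) (hab : a < b) :
    PySem.List.pyRange a b s = a :: PySem.List.pyRange (a + s) b s := by
  rw [PySem.List.pyRange_of_pos _ _ hs, PySem.List.pyRange_of_pos _ _ hs]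
  have h0 : 0 ≤ (b - (a + s) + s - 1) / s := Int.ediv_nonneg (by omega) (by omega)
  have h2 : (if a + s < b then ((b - (a + s) + s - 1) / s).toNat else 0)
      = ((b - (a + s) + s - 1) / s).toNat := by
    split_ifs with h
    · rfl
    · rw [Int.ediv_eq_zero_of_lt (by omega) (by omega)]; rfl
  have h1 : (if a < b then ((b - a + s - 1) / s).toNat else 0)
      = ((b - (a + s) + s - 1) / s).toNat + 1 := by
    rw [if_pos hab]
    have he : b - a + s - 1 = (b - (a + s) + s - 1) + 1 * s := by ring
    rw [he, Int.add_mul_ediv_right _ _ (by omega : s ≠ 0)]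
    omega
  rw [h1, h2, List.range_succ_eq_map, List.map_cons, List.map_map]
  congr 1
  · simp
  · apply List.map_congr_left
    intro k _
    simp [Function.comp]
    push_cast
    ring


theorem pvMinFacOdd (m : Nat) (hm : m % 2 = 1) : m.minFac % 2 = 1 := by
  by_contra h
  have h2 : 2 ∣ m.minFac := by omega
  have := h2.trans (Nat.minFac_dvd m)
  omega

theorem pvFindDiv (m : Nat) (hle : m.minFac ≤ Nat.sqrt m) :
    ∀ (k : Nat) (a : Int), a = (m.minFac : Int) - 2 * k → 3 ≤ a →
    (PySem.List.pyRange a ((Nat.sqrt m : Int) + 1) 2).find? (fun i => PySem.Int.mod (m : Int) i == 0)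
      = some (m.minFac : Int) := by
  intro k
  induction k with
  | zero =>
    intro a ha _
    have ha' : a = (m.minFac : Int) := by omega
    subst ha'
    rw [pvRange_cons _ _ _ (by omega) (by exact_mod_cast (by omega : (m.minFac : Int) < (Nat.sqrt m : Int) + 1))]
    rw [List.find?_cons_of_pos]
    simp only [beq_iff_eq]
    rw [PySem.Int.mod_eq_zero_iff_dvd]
    exact_mod_cast Int.natCast_dvd_natCast.mpr (Nat.minFac_dvd m)
  | succ k ih =>
    intro a ha ha3
    have hlt : a < (m.minFac : Int) := by omega
    rw [pvRange_cons _ _ _ (by omega) (by push_cast; omega)]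
    rw [List.find?_cons_of_neg, ih (a + 2) (by omega) (by omega)]
    simp only [beq_iff_eq]
    rw [PySem.Int.mod_eq_zero_iff_dvd]
    intro hdvd
    have h0 : a = (a.toNat : Int) := by omega
    rw [h0] at hdvd
    have hnat : a.toNat ∣ m := Int.natCast_dvd_natCast.mp hdvd
    have := Nat.minFac_le_of_dvd (by omega) hnat
    omega


theorem pvA_eq_minFac (m : Nat) (hm2 : m % 2 = 1) (hm3 : 3 ≤ m) :
    get_first_divisor_or_prime (m : Int) = (m.minFac : Int) := by
  have hmf2 : m.minFac % 2 = 1 := pvMinFacOdd m hm2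
  have hmf3 : 3 ≤ m.minFac := by
    have h1 := (Nat.minFac_prime (by omega : m ≠ 1)).two_le
    omega
  unfold get_first_divisor_or_prime
  rw [if_neg (by
    intro h
    rw [show ((2:Int)) = ((2:Nat):Int) by norm_num, PySem.Int.mod_natCast] at h
    omega)]
  have hsq : Int.sqrt (m : Int) = (Nat.sqrt m : Int) := by
    simp [Int.sqrt]
  rw [hsq]
  by_cases hle : m.minFac ≤ Nat.sqrt m
  · rw [pvFindDiv m hle ((m.minFac - 3) / 2) 3 (by omega) (by omega)]
  · rw [List.find?_eq_none.mpr ?_]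
    · -- returns m; show m = minFac, i.e. m prime
      by_cases hp : m.Prime
      · simp [Nat.Prime.minFac_eq hp]
      · exfalso
        have := Nat.minFac_sq_le_self (by omega : 0 < m) hp
        have : m.minFac ≤ Nat.sqrt m := Nat.le_sqrt.mpr (by nlinarith [sq_nonneg m.minFac])
        omega
    · intro x hx
      rw [PySem.List.mem_pyRange_iff_of_pos (by omega)] at hx
      simp only [beq_iff_eq]
      rw [PySem.Int.mod_eq_zero_iff_dvd]
      intro hdvd
      have h0 : x = (x.toNat : Int) := by omega
      rw [h0] at hdvd
      have hnat : x.toNat ∣ m := Int.natCast_dvd_natCast.mp hdvd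
      have := Nat.minFac_le_of_dvd (by omega) hnat
      omega

theorem pvInner_length (p : Nat) (M : List Int) : ∀ (spf : List Nat),
    (M.foldl (pvSieveInner p) spf).length = spf.length := by
  induction M with
  | nil => intro spf; rfl
  | cons x M ih =>
    intro spf
    simp only [List.foldl_cons]
    rw [ih]
    unfold pvSieveInner
    split_ifs <;> simp

theorem pvGetD_set (spf : List Nat) (t j v : Nat) :
    (spf.set t v).getD j 0 = if t = j ∧ t < spf.length then v else spf.getD j 0 := by
  by_cases h : t = j
  · by_cases h2 : t < spf.length
    · subst h
      simp [List.getD, List.getElem?_set, h2]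
    · have hn : spf[j]? = none := List.getElem?_eq_none (by omega)
      simp only [List.getD, List.getElem?_set, if_pos h, if_neg h2,
        if_neg (fun hc : t = j ∧ t < spf.length => h2 hc.2), hn]
  · simp only [List.getD, List.getElem?_set, if_neg h,
      if_neg (fun hc : t = j ∧ t < spf.length => h hc.1)]

theorem pvInner_getD (p : Nat) (M : List Int) : ∀ (spf : List Nat) (j : Nat),
    (∀ x ∈ M, p < x.toNat ∧ x.toNat < spf.length ∧ 0 ≤ x) →
    (M.foldl (pvSieveInner p) spf).getD j 0 =
      if (j : Int) ∈ M ∧ spf.getD j 0 = j then p else spf.getD j 0 := by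
  induction M with
  | nil => intro spf j _; simp
  | cons x M ih =>
    intro spf j hM
    obtain ⟨hpx, hxl, hx0⟩ := hM x (by simp)
    simp only [List.foldl_cons]
    rw [ih (pvSieveInner p spf x) j ?hmem]
    case hmem =>
      intro y hy
      have := hM y (by simp [hy])
      unfold pvSieveInner
      split_ifs <;> simpa using this
    have hs' : (pvSieveInner p spf x).getD j 0 =
        if x.toNat = j ∧ spf.getD j 0 = j then p else spf.getD j 0 := by
      unfold pvSieveInner
      split_ifs with hT hc hc
      · rw [pvGetD_set, if_pos ⟨hc.1, by omega⟩]
      · rw [pvGetD_set, if_neg (fun hcon : x.toNat = j ∧ x.toNat < spf.length => hc ⟨hcon.1, hcon.1 ▸ hT⟩)]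
      · exact absurd (hc.1 ▸ hc.2) hT
      · rfl
    rw [hs']
    have hjx : ((j : Int) = x) ↔ x.toNat = j := by omega
    simp only [List.mem_cons]
    by_cases hA : x.toNat = j
    · by_cases hB : spf.getD j 0 = j
      · rw [show (if x.toNat = j ∧ spf.getD j 0 = j then p else spf.getD j 0) = p from
            if_pos ⟨hA, hB⟩]
        rw [ite_self, if_pos ⟨Or.inl (hjx.mpr hA), hB⟩]
      · rw [show (if x.toNat = j ∧ spf.getD j 0 = j then p else spf.getD j 0) = spf.getD j 0 from
            if_neg (by tauto)]
        rw [if_neg (by tauto), if_neg (by tauto)]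
    · rw [show (if x.toNat = j ∧ spf.getD j 0 = j then p else spf.getD j 0) = spf.getD j 0 from
          if_neg (by tauto)]
      by_cases hB : spf.getD j 0 = j
      · by_cases hC : (j : Int) ∈ M
        · rw [if_pos ⟨hC, hB⟩, if_pos ⟨Or.inr hC, hB⟩]
        · rw [if_neg (by tauto), if_neg ?hr]
          case hr =>
            intro hc
            rcases hc.1 with h | h
            · exact hA (hjx.mp h)
            · exact hC h
      · rw [if_neg (by tauto), if_neg (by tauto)]

theorem pvStep (n : Nat) (P : Int) (spf : List Nat)
    (hP3 : 3 ≤ P) (hPodd : PySem.Int.mod P 2 = 1) (hPK : P ≤ (Nat.sqrt n : Int))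
    (hlen : spf.length = n + 1)
    (hInv : ∀ m : Nat, m ≤ n → m % 2 = 1 →
      spf.getD m 0 = if (m.minFac : Int) < P then m.minFac else m) :
    ∀ m : Nat, m ≤ n → m % 2 = 1 →
      (pvOuterStep n spf P).getD m 0 = if (m.minFac : Int) < P + 2 then m.minFac else m := by
  intro m hmn hm2
  set p := P.toNat with hp
  have hPp : P = (p : Int) := by omega
  have hp3 : 3 ≤ p := by omega
  have hpodd : p % 2 = 1 := by
    rw [PySem.Int.mod_eq_emod_of_pos (by omega)] at hPodd
    omega
  have hpn : p ≤ Nat.sqrt n := by omega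
  have hpsq : (p : Int) < (p : Int) * (p : Int) := by nlinarith
  have hpnn : p ≤ n := hpn.trans (Nat.sqrt_le_self n)
  have hIm := hInv m hmn hm2
  have hmf2 : m.minFac % 2 = 1 := pvMinFacOdd m hm2
  unfold pvOuterStep
  rw [← hp]
  by_cases hguard : spf.getD p 0 = p
  · rw [if_pos hguard]
    set M := PySem.List.pyRange ((p * p : Nat) : Int) ((n : Int) + 1) ((2 * p : Nat) : Int) with hM
    have hMmem : ∀ x, x ∈ M ↔ ((p * p : Nat) : Int) ≤ x ∧ x < (n : Int) + 1 ∧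
        ((2 * p : Nat) : Int) ∣ x - ((p * p : Nat) : Int) := by
      intro x
      rw [hM, PySem.List.mem_pyRange_iff_of_pos (by push_cast; omega)]
    rw [pvInner_getD p M spf m ?hcond]
    case hcond =>
      intro x hx
      rw [hMmem x] at hx
      push_cast at hx
      obtain ⟨hx1, hx2, _⟩ := hx
      have hxp : (p : Int) < x := lt_of_lt_of_le hpsq hx1
      refine ⟨by omega, by omega, by omega⟩
    -- trichotomy on m.minFac vs p
    rcases Nat.lt_trichotomy m.minFac p with hlt | heq | hgt
    · -- smallest prime factor already recorded
      have hgd : spf.getD m 0 = m.minFac := by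
        rw [hIm, if_pos (by push_cast; omega)]
      rw [if_neg ?hng, hgd, if_pos (by push_cast; omega)]
      case hng =>
        intro ⟨hmm, hgm⟩
        rw [hMmem] at hmm
        push_cast at hmm
        rw [hgd] at hgm
        have h1 : m.minFac ≤ m := Nat.minFac_le (by omega)
        omega
    · -- m gets marked now (or is p itself)
      have hgd : spf.getD m 0 = m := by
        rw [hIm, if_neg (by push_cast; omega)]
      by_cases hmp : m = p
      · rw [if_neg ?hng, hgd, if_pos (by push_cast; omega), heq, hmp]
        case hng =>
          intro ⟨hmm, _⟩
          rw [hMmem] at hmm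
          push_cast at hmm
          omega
      · have hdvd : p ∣ m := heq ▸ Nat.minFac_dvd m
        obtain ⟨r, hr⟩ := hdvd
        have hr1 : r ≠ 1 := by intro h; rw [h, Nat.mul_one] at hr; exact hmp hr
        have hr0 : 0 < r := by
          rcases Nat.eq_zero_or_pos r with h | h
          · subst h; rw [Nat.mul_zero] at hr; omega
          · exact h
        have hrodd : r % 2 = 1 := by
          by_contra h
          have h2 : 2 ∣ r := by omega
          obtain ⟨t, ht⟩ := h2
          have hm2' : m = 2 * (p * t) := by rw [hr, ht]; ring
          omega
        have hrp : p ≤ r := by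
          have h1 : r.minFac ∣ m := (Nat.minFac_dvd r).trans ⟨p, by rw [hr]; ring⟩
          have h2 : m.minFac ≤ r.minFac := Nat.minFac_le_of_dvd (Nat.minFac_prime hr1).two_le h1
          have h3 : r.minFac ≤ r := Nat.minFac_le hr0
          omega
        have hmm : (m : Int) ∈ M := by
          rw [hMmem]
          have hm' : (m : Int) = (p : Int) * r := by exact_mod_cast hr
          have ht : (r : Int) = (p : Int) + 2 * ((r - p) / 2 : Nat) := by omega
          have hA : (m : Int) = (p : Int) * p + 2 * ((p : Int) * ((r - p) / 2 : Nat)) := by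
            rw [hm', ht]; ring
          refine ⟨by push_cast; nlinarith, by push_cast; omega, ⟨((r - p) / 2 : Nat), ?_⟩⟩
          rw [show ((p * p : Nat) : Int) = (p : Int) * p by push_cast; ring,
              show ((2 * p : Nat) : Int) = 2 * (p : Int) by push_cast; ring]
          ring_nf
          ring_nf at hA
          linarith
        rw [if_pos ⟨hmm, hgd⟩, heq, if_pos (by push_cast; omega)]
    · -- untouched: smallest prime factor still larger than p
      have hgd : spf.getD m 0 = m := by
        rw [hIm, if_neg (by push_cast; omega)]
      rw [if_neg ?hng, hgd, if_neg (by push_cast; omega)]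
      case hng =>
        intro ⟨hmm, _⟩
        rw [hMmem] at hmm
        obtain ⟨_, _, k, hk⟩ := hmm
        have hdvd : p ∣ m := by
          have : (p : Int) ∣ (m : Int) := ⟨p + 2 * k, by push_cast at hk ⊢; ring_nf; ring_nf at hk; linarith⟩
          exact_mod_cast Int.natCast_dvd_natCast.mp this
        have := Nat.minFac_le_of_dvd (by omega) hdvd
        omega
  · rw [if_neg hguard]
    have hIp := hInv p hpnn hpodd
    have hplt : p.minFac < p := by
      by_cases h : (p.minFac : Int) < P
      · omega
      · rw [hIp, if_neg h] at hguard; exact absurd rfl hguard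
    rw [hIm]
    by_cases h1 : m = 1
    · subst h1
      rw [Nat.minFac_one, if_pos (by omega), if_pos (by omega)]
    · have hmfp : m.minFac.Prime := Nat.minFac_prime h1
      by_cases hcase : (m.minFac : Int) < P
      · rw [if_pos hcase, if_pos (by omega)]
      · rw [if_neg hcase, if_neg ?hg]
        case hg =>
          intro hcon
          -- minFac m ∈ {p, p+1}; p+1 even, so minFac m = p; but p is composite
          have hfp : m.minFac = p := by omega
          have : p.minFac = p := Nat.Prime.minFac_eq (hfp ▸ hmfp)
          omega

theorem pvRange_nil (a b s : Int) (hs : 0 < s) (hab : b ≤ a) :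
    PySem.List.pyRange a b s = [] := by
  rw [PySem.List.pyRange_of_pos _ _ hs, if_neg (by omega)]
  rfl

theorem pvOuterStep_length (n : Nat) (spf : List Nat) (pi : Int) :
    (pvOuterStep n spf pi).length = spf.length := by
  unfold pvOuterStep
  split_ifs
  · rw [pvInner_length]
  · rfl

theorem pvOuter (n : Nat) (c : Nat) : ∀ (P : Int) (spf : List Nat),
    ((Nat.sqrt n : Int) + 1 - P).toNat ≤ c →
    3 ≤ P → PySem.Int.mod P 2 = 1 →
    spf.length = n + 1 →
    (∀ m : Nat, m ≤ n → m % 2 = 1 → spf.getD m 0 = if (m.minFac : Int) < P then m.minFac else m) →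
    ∀ m : Nat, m ≤ n → m % 2 = 1 →
      ((PySem.List.pyRange P ((Nat.sqrt n : Int) + 1) 2).foldl (pvOuterStep n) spf).getD m 0 =
        if ((m.minFac : Int) < P ∨ m.minFac ≤ Nat.sqrt n) then m.minFac else m := by
  induction c with
  | zero =>
    intro P spf hc hP3 hPodd hlen hInv m hmn hm2
    rw [pvRange_nil _ _ _ (by omega) (by omega), List.foldl_nil, hInv m hmn hm2]
    by_cases hx : (m.minFac : Int) < P
    · rw [if_pos hx, if_pos (Or.inl hx)]
    · rw [if_neg hx, if_neg ?_]
      intro hcon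
      rcases hcon with h | h
      · exact hx h
      · exact hx (by omega)
  | succ c ih =>
    intro P spf hc hP3 hPodd hlen hInv m hmn hm2
    by_cases hPK : P < (Nat.sqrt n : Int) + 1
    · rw [pvRange_cons _ _ _ (by omega) hPK, List.foldl_cons]
      have hstep := pvStep n P spf hP3 hPodd (by omega) hlen hInv
      have hodd' : PySem.Int.mod (P + 2) 2 = 1 := by
        rw [PySem.Int.mod_eq_emod_of_pos (by omega)] at hPodd ⊢
        omega
      have hres := ih (P + 2) (pvOuterStep n spf P) (by omega) (by omega) hodd'
        (by rw [pvOuterStep_length]; exact hlen) hstep m hmn hm2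
      rw [hres]
      have hmf2 : m.minFac % 2 = 1 := pvMinFacOdd m hm2
      by_cases hcond : ((m.minFac : Int) < P ∨ m.minFac ≤ Nat.sqrt n)
      · rw [if_pos hcond, if_pos ?_]
        rcases hcond with h | h
        · exact Or.inl (by omega)
        · exact Or.inr h
      · rw [if_neg hcond, if_neg ?_]
        intro hcon
        rcases hcon with h | h
        · -- minFac < P+2, ¬(<P), ¬(≤ sqrt n), P ≤ sqrt n: minFac ∈ {P, P+1}, parity kills it
          rw [PySem.Int.mod_eq_emod_of_pos (by omega)] at hPodd
          omega
        · exact hcond (Or.inr h)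
    · rw [pvRange_nil _ _ _ (by omega) (by omega), List.foldl_nil, hInv m hmn hm2]
      by_cases hx : (m.minFac : Int) < P
      · rw [if_pos hx, if_pos (Or.inl hx)]
      · rw [if_neg hx, if_neg ?_]
        intro hcon
        rcases hcon with h | h
        · exact hx h
        · exact hx (by omega)

theorem pvSpf (n m : Nat) (hm3 : 3 ≤ m) (hmn : m ≤ n) (hm2 : m % 2 = 1) :
    (pvSieveSpf n).getD m 0 = m.minFac := by
  have hmf2 : m.minFac % 2 = 1 := pvMinFacOdd m hm2
  have hmf3 : 3 ≤ m.minFac := by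
    have := (Nat.minFac_prime (by omega : m ≠ 1)).two_le
    omega
  unfold pvSieveSpf
  rw [pvOuter n ((Nat.sqrt n : Int) + 1 - 3).toNat 3 _ (by omega) (by omega)
    (by rw [PySem.Int.mod_eq_emod_of_pos (by omega)]; rfl)
    (by simp) ?hinit m hmn hm2]
  case hinit =>
    intro j hj hj2
    have hgr : (List.range (n + 1)).getD j 0 = j := by
      simp [List.getD, List.getElem?_range (by omega : j < n + 1)]
    rw [hgr]
    by_cases hjj : j = 1
    · subst hjj; rw [Nat.minFac_one, if_pos (by omega)]
    · have : 2 ≤ j.minFac := (Nat.minFac_prime (by omega : j ≠ 1)).two_le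
      have hjodd : j.minFac % 2 = 1 := pvMinFacOdd j hj2
      rw [if_neg (by omega)]
  by_cases hle : m.minFac ≤ Nat.sqrt n
  · rw [if_pos (Or.inr hle)]
  · rw [if_neg (by omega : ¬((m.minFac : Int) < 3 ∨ m.minFac ≤ Nat.sqrt n))]
    -- m must be prime here
    by_cases hp : m.Prime
    · exact (Nat.Prime.minFac_eq hp).symm
    · exfalso
      have h1 := Nat.minFac_sq_le_self (by omega : 0 < m) hp
      have h2 : m.minFac ≤ Nat.sqrt m := Nat.le_sqrt.mpr (by nlinarith)
      have h3 : Nat.sqrt m ≤ Nat.sqrt n := Nat.sqrt_le_sqrt hmn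
      omega

theorem pvMain (limit : Int) :
    generate_shosho_list_final limit = generate_shosho_list_final_alt limit := by
  unfold generate_shosho_list_final generate_shosho_list_final_alt
  by_cases hl : limit < 3
  · rw [if_pos hl, pvRange_nil 3 (limit + 1) 2 (by omega) (by omega), List.foldl_nil]
  · rw [if_neg hl]
    show _ = (PySem.List.pyRange 3 (limit + 1) 2).foldl
      (fun acc num => acc ++ List.replicate (((pvSieveSpf limit.toNat).getD num.toNat 0 - 1) / 2) num) [2]
    apply PySem.List.foldl_congr_mem
    intro acc x hx
    rw [PySem.List.mem_pyRange_iff_of_pos (by omega)] at hx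
    obtain ⟨hx3, hxlt, k, hk⟩ := hx
    have hxm : x = (x.toNat : Int) := by omega
    set m := x.toNat with hmdef
    have hm3 : 3 ≤ m := by omega
    have hm2 : m % 2 = 1 := by omega
    have hmn : m ≤ limit.toNat := by omega
    have hmf3 : 3 ≤ m.minFac := by
      have h2 := (Nat.minFac_prime (by omega : m ≠ 1)).two_le
      by_contra h
      interval_cases hmf : m.minFac
      · have := Nat.minFac_dvd m
        rw [hmf] at this
        omega
    dsimp only
    rw [hxm, pvA_eq_minFac m hm2 hm3, pvSpf limit.toNat m hm3 hmn hm2]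
    have hrc : (if (m : Int) = (m.minFac : Int) then PySem.Int.floordiv ((m : Int) - 1) 2
        else PySem.Int.floordiv ((m.minFac : Int) - 1) 2) = PySem.Int.floordiv ((m.minFac : Int) - 1) 2 := by
      split_ifs with h
      · rw [h]
      · rfl
    rw [hrc]
    have hcast : ((m.minFac : Int) - 1) = ((m.minFac - 1 : Nat) : Int) := by omega
    rw [hcast, show (2 : Int) = ((2 : Nat) : Int) by norm_num, PySem.Int.floordiv_natCast,
      PySem.List.pyRepeat_singleton, Int.toNat_natCast]

-- ===== VERDICT (by name: the statement is the Claim_ definition above) =====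
theorem generate_shosho_list_final_spec : Claim_equal_generate_shosho_list_final := by
  intro limit _
  unfold Spec_generate_shosho_list_final
  exact pvMain limit
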